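-- pv_equiv track=rewrite | github.com/Khamel83/atlas | archive/legacy_processors/focused_mass_extraction.py | is_likely_transcript
-- ===== SOURCE A (Python) =====
-- def is_likely_transcript(text):
--     """Check if text looks like a podcast transcript"""
--
--     # Look for transcript indicators
--     transcript_indicators = [
--         'transcript', 'speaker', 'host:', 'guest:', 'interviewer:',
--         'moderator:', 'narrator:', 'announcer:'
--     ]
--
--     # Look for conversational patterns
--     conversation_patterns = [
--         ':', ' said ', ' says ', ' asked ', ' replied ',
--         'yeah', 'um', 'uh', 'you know', 'i think'
--     ]
--
--     text_lower = text.lower()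
--
--     # Check for transcript indicators
--     has_indicators = any(indicator in text_lower for indicator in transcript_indicators)
--
--     # Check for conversational patterns
--     has_conversation = sum(1 for pattern in conversation_patterns if pattern in text_lower) >= 3
--
--     # Check for speaker formatting (e.g., "John: Hello there")
--     has_speaker_format = len([line for line in text.split('\n') if ':' in line and len(line) < 200]) > 5
--
--     return has_indicators or has_conversation or has_speaker_format
-- ===== SOURCE B (Python) =====
-- def is_likely_transcript(text):
--     """Check if text looks like a podcast transcript (single pass over lines)."""
--
--     transcript_indicators = [
--         'transcript', 'speaker', 'host:', 'guest:', 'interviewer:',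
--         'moderator:', 'narrator:', 'announcer:'
--     ]
--
--     conversation_patterns = [
--         ':', ' said ', ' says ', ' asked ', ' replied ',
--         'yeah', 'um', 'uh', 'you know', 'i think'
--     ]
--
--     has_indicator = False
--     seen_patterns = set()
--     speaker_lines = 0
--
--     for line in text.split('\n'):
--         low = line.lower()
--         if not has_indicator:
--             has_indicator = any(ind in low for ind in transcript_indicators)
--         for pat in conversation_patterns:
--             if pat in low:
--                 seen_patterns.add(pat)
--         if ':' in line and len(line) < 200:
--             speaker_lines += 1
--
--     return has_indicator or len(seen_patterns) >= 3 or speaker_lines > 5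
-- ===== Notes on version B (the rewrite author's own statement) =====
-- stated objective: alternative
-- what changed: Replaces A's three independent whole-text scans (indicator any, pattern count, speaker-line filter) by a single traversal of text.split(' ') that per line sets an indicator flag, accumulates the set of conversation patterns seen, and counts speaker-formatted lines.
import Mathlib
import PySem

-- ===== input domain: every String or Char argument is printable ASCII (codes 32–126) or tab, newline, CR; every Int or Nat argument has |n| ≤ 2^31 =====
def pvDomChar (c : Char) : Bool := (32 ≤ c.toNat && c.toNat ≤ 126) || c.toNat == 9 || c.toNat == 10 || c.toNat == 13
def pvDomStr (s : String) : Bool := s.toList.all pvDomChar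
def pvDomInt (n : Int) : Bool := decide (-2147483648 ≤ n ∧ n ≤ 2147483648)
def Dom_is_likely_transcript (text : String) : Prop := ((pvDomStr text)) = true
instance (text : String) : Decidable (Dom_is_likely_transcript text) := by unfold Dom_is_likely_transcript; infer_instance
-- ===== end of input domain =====

-- B replaces A's three independent whole-text scans by one combined pass over the lines of the text (objective: alternative decomposition, same cost).


-- the two literal keyword lists both Pythons carry
def transcriptIndicators : List String :=
  ["transcript", "speaker", "host:", "guest:", "interviewer:",
   "moderator:", "narrator:", "announcer:"]

def conversationPatterns : List String :=
  [":", " said ", " says ", " asked ", " replied ",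
   "yeah", "um", "uh", "you know", "i think"]

-- ===== PORT A =====
def is_likely_transcript (text : String) : Bool :=
  let text_lower := PySem.Str.lower text
  let has_indicators :=
    transcriptIndicators.any (fun ind => PySem.Str.isIn ind text_lower)
  let has_conversation :=
    decide (((conversationPatterns.filter
        (fun p => PySem.Str.isIn p text_lower)).map (fun _ => (1 : Int))).sum ≥ 3)
  let has_speaker_format :=
    decide ((((PySem.Str.split? text "\n").getD []).filter
        (fun line => PySem.Str.isIn ":" line && decide (PySem.Str.len line < 200))).length > 5)
  has_indicators || has_conversation || has_speaker_format

-- ===== PORT B =====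
-- one step of Source B's single loop over the lines: state = (has_indicator, seen_patterns, speaker_lines)
def altStep (st : Bool × PySem.Set String × Int) (line : String) : Bool × PySem.Set String × Int :=
  let low := PySem.Str.lower line
  let hasInd := if st.1 then true
    else transcriptIndicators.any (fun ind => PySem.Str.isIn ind low)
  let seen := conversationPatterns.foldl
    (fun s p => if PySem.Str.isIn p low then PySem.Set.add s p else s) st.2.1
  let speaker := if PySem.Str.isIn ":" line && decide (PySem.Str.len line < 200)
    then st.2.2 + 1 else st.2.2
  (hasInd, seen, speaker)

def is_likely_transcript_alt (text : String) : Bool :=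
  let st := ((PySem.Str.split? text "\n").getD []).foldl altStep (false, ([] : PySem.Set String), (0 : Int))
  st.1 || decide (st.2.1.length ≥ 3) || decide (st.2.2 > 5)

-- ===== PRECONDITION & SPEC =====
def Spec_is_likely_transcript (text : String) (out : Bool) : Prop := out = is_likely_transcript_alt text
instance (text : String) (out : Bool) : Decidable (Spec_is_likely_transcript text out) := by unfold Spec_is_likely_transcript; infer_instance

-- ===== CLAIM (what is proved, stated in full; the proofs are below) =====
def Claim_equal_is_likely_transcript : Prop := ∀ (text : String), Dom_is_likely_transcript text → Spec_is_likely_transcript text (is_likely_transcript text)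

-- ===== LEMMAS AND PROOFS =====

-- Python's text.split('\n'), structurally: lines of a character list
def linesOf : List Char → List (List Char)
  | [] => [[]]
  | c :: t =>
    if c = '\n' then [] :: linesOf t
    else match linesOf t with
      | [] => [[c]]
      | L :: Ls => (c :: L) :: Ls

theorem linesOf_ne_nil (cs : List Char) : linesOf cs ≠ [] := by
  cases cs with
  | nil => simp [linesOf]
  | cons c t =>
    simp only [linesOf]
    split
    · simp
    · cases h : linesOf t <;> simp

def consHead (x : List Char) : List (List Char) → List (List Char)
  | [] => [x]
  | L :: Ls => (x ++ L) :: Ls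

theorem go_char (fuel : Nat) : ∀ (l cur : List Char) (acc : List (List Char)),
    l.length ≤ fuel →
    PySem.Chars.splitOn.go ['\n'] fuel l cur acc = acc.reverse ++ consHead cur.reverse (linesOf l) := by
  induction fuel with
  | zero =>
    intro l cur acc h
    have : l = [] := by cases l <;> simp_all
    subst this
    simp [PySem.Chars.splitOn.go, linesOf, consHead]
  | succ f ih =>
    intro l cur acc h
    cases l with
    | nil => simp [PySem.Chars.splitOn.go, linesOf, consHead]
    | cons c rest =>
      by_cases hc : c = '\n'
      · subst hc
        have hpre : List.isPrefixOf ['\n'] ('\n' :: rest) = true := by simp [List.isPrefixOf]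
        rw [show PySem.Chars.splitOn.go ['\n'] (f+1) ('\n' :: rest) cur acc
              = PySem.Chars.splitOn.go ['\n'] f (List.drop 1 ('\n' :: rest)) [] (cur.reverse :: acc) by
            simp [PySem.Chars.splitOn.go, hpre]]
        rw [ih _ _ _ (by simpa using Nat.le_of_succ_le_succ h)]
        obtain ⟨L, Ls, hL⟩ : ∃ L Ls, linesOf rest = L :: Ls := by
          cases hx : linesOf rest with
          | nil => exact absurd hx (linesOf_ne_nil rest)
          | cons L Ls => exact ⟨L, Ls, rfl⟩
        simp [linesOf, hL, consHead]
      · have hpre : List.isPrefixOf ['\n'] (c :: rest) = false := by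
          simp [List.isPrefixOf]; exact fun h' => absurd h'.symm hc
        rw [show PySem.Chars.splitOn.go ['\n'] (f+1) (c :: rest) cur acc
              = PySem.Chars.splitOn.go ['\n'] f rest (c :: cur) acc by
            simp [PySem.Chars.splitOn.go, hpre]]
        rw [ih _ _ _ (by simpa using Nat.le_of_succ_le_succ h)]
        obtain ⟨L, Ls, hL⟩ : ∃ L Ls, linesOf rest = L :: Ls := by
          cases hx : linesOf rest with
          | nil => exact absurd hx (linesOf_ne_nil rest)
          | cons L Ls => exact ⟨L, Ls, rfl⟩
        simp [linesOf, hL, consHead, hc]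

theorem splitOn_newline_eq (cs : List Char) :
    PySem.Chars.splitOn cs ['\n'] = linesOf cs := by
  rw [PySem.Chars.splitOn, go_char (cs.length + 1) cs [] [] (by omega)]
  obtain ⟨L, Ls, hL⟩ : ∃ L Ls, linesOf cs = L :: Ls := by
    cases hx : linesOf cs with
    | nil => exact absurd hx (linesOf_ne_nil cs)
    | cons L Ls => exact ⟨L, Ls, rfl⟩
  simp [hL, consHead]

theorem prefix_headI (cs : List Char) : ∀ (p : List Char), '\n' ∉ p →
    (p <+: cs ↔ p <+: (linesOf cs).headI) := by
  induction cs with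
  | nil => intro p hn; simp [linesOf]
  | cons c t ih =>
    intro p hn
    by_cases hc : c = '\n'
    · subst hc
      have hh : (linesOf ('\n' :: t)).headI = [] := by simp [linesOf]
      rw [hh]
      cases p with
      | nil => simp
      | cons q p' =>
        constructor
        · intro hpre
          rcases List.cons_prefix_cons.mp hpre with ⟨hq, _⟩
          exact absurd (hq ▸ List.mem_cons_self) hn
        · intro hpre; simp at hpre
    · obtain ⟨L, Ls, hL⟩ : ∃ L Ls, linesOf t = L :: Ls := by
        cases hx : linesOf t with
        | nil => exact absurd hx (linesOf_ne_nil t)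
        | cons L Ls => exact ⟨L, Ls, rfl⟩
      have hh : (linesOf (c :: t)).headI = c :: L := by simp [linesOf, hc, hL]
      rw [hh]
      cases p with
      | nil => simp
      | cons q p' =>
        have hn' : '\n' ∉ p' := fun h => hn (List.mem_cons_of_mem _ h)
        constructor
        · intro hpre
          rcases List.cons_prefix_cons.mp hpre with ⟨hq, hp'⟩
          exact List.cons_prefix_cons.mpr ⟨hq, by
            have := (ih p' hn').mp hp'
            rwa [hL] at this⟩
        · intro hpre
          rcases List.cons_prefix_cons.mp hpre with ⟨hq, hp'⟩
          exact List.cons_prefix_cons.mpr ⟨hq, (ih p' hn').mpr (by rwa [hL])⟩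

theorem infix_lines (cs : List Char) : ∀ (p : List Char), p ≠ [] → '\n' ∉ p →
    (p <:+: cs ↔ ∃ l ∈ linesOf cs, p <:+: l) := by
  induction cs with
  | nil =>
    intro p hp hn
    simp [linesOf, List.infix_nil, hp]
  | cons c t ih =>
    intro p hp hn
    rw [List.infix_cons_iff]
    by_cases hc : c = '\n'
    · subst hc
      have hpre : ¬ p <+: ('\n' :: t) := by
        cases p with
        | nil => exact absurd rfl hp
        | cons q p' =>
          intro hpre
          rcases List.cons_prefix_cons.mp hpre with ⟨hq, _⟩
          exact hn (hq ▸ List.mem_cons_self)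
      simp only [linesOf]
      constructor
      · rintro (h | h)
        · exact absurd h hpre
        · rcases (ih p hp hn).mp h with ⟨l, hl, hinf⟩
          exact ⟨l, List.mem_cons_of_mem _ hl, hinf⟩
      · rintro ⟨l, hl, hinf⟩
        rcases List.mem_cons.mp hl with rfl | hl'
        · exact absurd hinf (by simp [List.infix_nil, hp])
        · exact Or.inr ((ih p hp hn).mpr ⟨l, hl', hinf⟩)
    · obtain ⟨L, Ls, hL⟩ : ∃ L Ls, linesOf t = L :: Ls := by
        cases hx : linesOf t with
        | nil => exact absurd hx (linesOf_ne_nil t)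
        | cons L Ls => exact ⟨L, Ls, rfl⟩
      have hlines : linesOf (c :: t) = (c :: L) :: Ls := by simp [linesOf, hc, hL]
      have hpfx : p <+: (c :: t) ↔ p <+: (c :: L) := by
        have := prefix_headI (c :: t) p hn
        rwa [hlines] at this
      rw [hlines]
      constructor
      · rintro (h | h)
        · exact ⟨c :: L, List.mem_cons_self, (hpfx.mp h).isInfix⟩
        · rcases (ih p hp hn).mp h with ⟨l, hl, hinf⟩
          rw [hL] at hl
          rcases List.mem_cons.mp hl with rfl | hl'
          · exact ⟨c :: l, List.mem_cons_self, hinf.trans (List.infix_cons_iff.mpr (Or.inr (List.infix_refl _)))⟩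
          · exact ⟨l, List.mem_cons_of_mem _ hl', hinf⟩
      · rintro ⟨l, hl, hinf⟩
        rcases List.mem_cons.mp hl with rfl | hl'
        · rcases List.infix_cons_iff.mp hinf with h | h
          · exact Or.inl (hpfx.mpr h)
          · exact Or.inr ((ih p hp hn).mpr ⟨L, by rw [hL]; exact List.mem_cons_self, h⟩)
        · exact Or.inr ((ih p hp hn).mpr ⟨l, by rw [hL]; exact List.mem_cons_of_mem _ hl', hinf⟩)

theorem lowerChar_eq_newline_iff (c : Char) :
    PySem.Chars.lowerChar c = '\n' ↔ c = '\n' := by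
  unfold PySem.Chars.lowerChar PySem.Chars.isupper
  split
  · rename_i h
    simp only [Bool.and_eq_true, decide_eq_true_eq] at h
    constructor
    · intro he
      have h1 : ('A' : Char).toNat ≤ c.toNat := h.1
      have h2 : c.toNat ≤ ('Z' : Char).toNat := h.2
      have hv : (c.toNat + 32).isValidChar := by
        have : c.toNat ≤ 90 := h2
        left; omega
      have hcg := congrArg Char.toNat he
      rw [Char.toNat_ofNat, if_pos hv] at hcg
      have : ('\n' : Char).toNat = 10 := rfl
      omega
    · intro he; subst he; simp_all
  · simp

theorem linesOf_lower (cs : List Char) :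
    linesOf (PySem.Chars.lower cs) = (linesOf cs).map PySem.Chars.lower := by
  induction cs with
  | nil => simp [linesOf, PySem.Chars.lower]
  | cons c t ih =>
    by_cases hc : c = '\n'
    · subst hc
      have h1 : PySem.Chars.lowerChar '\n' = '\n' := (lowerChar_eq_newline_iff _).mpr rfl
      simp [PySem.Chars.lower, linesOf, h1]
      simp [PySem.Chars.lower] at ih ⊢
      exact ih
    · have h1 : PySem.Chars.lowerChar c ≠ '\n' := fun h => hc ((lowerChar_eq_newline_iff c).mp h)
      obtain ⟨L, Ls, hL⟩ : ∃ L Ls, linesOf t = L :: Ls := by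
        cases hx : linesOf t with
        | nil => exact absurd hx (linesOf_ne_nil t)
        | cons L Ls => exact ⟨L, Ls, rfl⟩
      have hlt : linesOf (PySem.Chars.lower t) = PySem.Chars.lower L :: Ls.map PySem.Chars.lower := by
        rw [ih, hL]; simp
      show linesOf (PySem.Chars.lower (c :: t)) = _
      rw [show PySem.Chars.lower (c :: t) = PySem.Chars.lowerChar c :: PySem.Chars.lower t from rfl]
      simp only [linesOf, if_neg h1, hlt, hL, if_neg hc]
      simp [PySem.Chars.lower]

theorem split_lines_toList (text : String) :
    ((PySem.Str.split? text "\n").getD []).map String.toList = linesOf text.toList := by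
  have h := PySem.Str.split?_map text "\n"
  have hsep : ("\n" : String).toList = ['\n'] := rfl
  rw [hsep] at h
  rw [show PySem.Chars.split? text.toList ['\n'] = some (PySem.Chars.splitOn text.toList ['\n']) by
        simp [PySem.Chars.split?]] at h
  cases hs : PySem.Str.split? text "\n" with
  | none => rw [hs] at h; simp at h
  | some lines =>
    rw [hs] at h
    simp only [Option.map_some] at h
    have := Option.some.inj h
    simpa [splitOn_newline_eq] using this

theorem isIn_lower_lines (p text : String) (hp : p.toList ≠ []) (hn : '\n' ∉ p.toList) :
    (PySem.Str.isIn p (PySem.Str.lower text) = true ↔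
      ∃ l ∈ (PySem.Str.split? text "\n").getD [], PySem.Str.isIn p (PySem.Str.lower l) = true) := by
  rw [PySem.Str.isIn_iff_infix]
  rw [show (PySem.Str.lower text).toList = PySem.Chars.lower text.toList by simp]
  rw [infix_lines _ _ hp hn, linesOf_lower]
  constructor
  · rintro ⟨l, hl, hinf⟩
    rcases List.mem_map.mp hl with ⟨l0, hl0, rfl⟩
    have := split_lines_toList text
    rcases List.mem_map.mp (this ▸ hl0 : l0 ∈ ((PySem.Str.split? text "\n").getD []).map String.toList) with ⟨ls, hls, rfl⟩
    exact ⟨ls, hls, by rw [PySem.Str.isIn_iff_infix]; simpa using hinf⟩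
  · rintro ⟨ls, hls, hIn⟩
    rw [PySem.Str.isIn_iff_infix] at hIn
    refine ⟨PySem.Chars.lower ls.toList, List.mem_map.mpr ⟨ls.toList, ?_, rfl⟩, by simpa using hIn⟩
    rw [← split_lines_toList text]
    exact List.mem_map.mpr ⟨ls, hls, rfl⟩

def indLine (l : String) : Bool := transcriptIndicators.any (fun ind => PySem.Str.isIn ind (PySem.Str.lower l))
def seenLine (s : PySem.Set String) (l : String) : PySem.Set String :=
  conversationPatterns.foldl (fun s p => if PySem.Str.isIn p (PySem.Str.lower l) then PySem.Set.add s p else s) s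
def spkLine (l : String) : Bool := PySem.Str.isIn ":" l && decide (PySem.Str.len l < 200)

theorem altStep_eq (st : Bool × PySem.Set String × Int) (l : String) :
    altStep st l = (st.1 || indLine l, seenLine st.2.1 l, if spkLine l then st.2.2 + 1 else st.2.2) := by
  obtain ⟨b, s, n⟩ := st
  cases b <;> simp [altStep, indLine, seenLine, spkLine]

theorem fold_eq (L : List String) : ∀ (b : Bool) (s : PySem.Set String) (n : Int),
    L.foldl altStep (b, s, n) =
      (b || L.any indLine, L.foldl seenLine s,
       n + ((L.filter spkLine).length : Int)) := by
  induction L with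
  | nil => intro b s n; simp
  | cons l L ih =>
    intro b s n
    simp only [List.foldl_cons, altStep_eq, ih, List.any_cons, List.filter_cons]
    refine Prod.ext (by simp [Bool.or_assoc]) (Prod.ext rfl ?_)
    by_cases hc : spkLine l = true
    · simp only [hc, if_pos]
      simp
      ring
    · simp only [Bool.not_eq_true] at hc
      simp [hc]

theorem seen_inner_mem (c : String → Bool) (ps : List String) :
    ∀ (s : PySem.Set String) (x : String),
    (x ∈ ps.foldl (fun s p => if c p then PySem.Set.add s p else s) s ↔
      x ∈ s ∨ (x ∈ ps ∧ c x = true)) := by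
  induction ps with
  | nil => intro s x; simp
  | cons p ps ih =>
    intro s x
    simp only [List.foldl_cons]
    by_cases hc : c p
    · rw [if_pos hc, ih, PySem.Set.mem_add]
      constructor
      · rintro ((h | rfl) | h)
        · exact Or.inl h
        · exact Or.inr ⟨List.mem_cons_self, hc⟩
        · exact Or.inr ⟨List.mem_cons_of_mem _ h.1, h.2⟩
      · rintro (h | ⟨hmem, hcx⟩)
        · exact Or.inl (Or.inl h)
        · rcases List.mem_cons.mp hmem with rfl | h2
          · exact Or.inl (Or.inr rfl)
          · exact Or.inr ⟨h2, hcx⟩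
    · rw [if_neg hc, ih]
      constructor
      · rintro (h | h)
        · exact Or.inl h
        · exact Or.inr ⟨List.mem_cons_of_mem _ h.1, h.2⟩
      · rintro (h | ⟨hmem, hcx⟩)
        · exact Or.inl h
        · rcases List.mem_cons.mp hmem with rfl | h2
          · exact absurd hcx (by simpa using hc)
          · exact Or.inr ⟨h2, hcx⟩

theorem seen_inner_nodup (c : String → Bool) (ps : List String) :
    ∀ (s : PySem.Set String), s.Nodup →
    (ps.foldl (fun s p => if c p then PySem.Set.add s p else s) s).Nodup := by
  induction ps with
  | nil => intro s hs; simpa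
  | cons p ps ih =>
    intro s hs
    simp only [List.foldl_cons]
    by_cases hc : c p
    · rw [if_pos hc]; exact ih _ (PySem.Set.nodup_add s p hs)
    · rw [if_neg hc]; exact ih _ hs

theorem fold_seen_mem (L : List String) : ∀ (s : PySem.Set String) (x : String),
    (x ∈ L.foldl seenLine s ↔
      x ∈ s ∨ (x ∈ conversationPatterns ∧ ∃ l ∈ L, PySem.Str.isIn x (PySem.Str.lower l) = true)) := by
  induction L with
  | nil => intro s x; simp
  | cons l L ih =>
    intro s x
    simp only [List.foldl_cons]
    rw [ih, show seenLine s l = conversationPatterns.foldl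
      (fun s p => if PySem.Str.isIn p (PySem.Str.lower l) then PySem.Set.add s p else s) s from rfl,
      seen_inner_mem]
    constructor
    · rintro ((h | ⟨hp, hc⟩) | ⟨hp, l2, hl2, hc⟩)
      · exact Or.inl h
      · exact Or.inr ⟨hp, l, List.mem_cons_self, hc⟩
      · exact Or.inr ⟨hp, l2, List.mem_cons_of_mem _ hl2, hc⟩
    · rintro (h | ⟨hp, l2, hl2, hc⟩)
      · exact Or.inl (Or.inl h)
      · rcases List.mem_cons.mp hl2 with rfl | h2
        · exact Or.inl (Or.inr ⟨hp, hc⟩)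
        · exact Or.inr ⟨hp, l2, h2, hc⟩

theorem fold_seen_nodup (L : List String) : ∀ (s : PySem.Set String),
    s.Nodup → (L.foldl seenLine s).Nodup := by
  induction L with
  | nil => intro s h; simpa
  | cons l L ih =>
    intro s h
    simp only [List.foldl_cons]
    exact ih _ (seen_inner_nodup _ _ _ h)

theorem indicators_ok : ∀ p ∈ transcriptIndicators, p.toList ≠ [] ∧ '\n' ∉ p.toList := by decide

theorem patterns_ok : ∀ p ∈ conversationPatterns, p.toList ≠ [] ∧ '\n' ∉ p.toList := by decide

theorem patterns_nodup : conversationPatterns.Nodup := by decide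

theorem a_eq_b (text : String) : is_likely_transcript text = is_likely_transcript_alt text := by
  unfold is_likely_transcript is_likely_transcript_alt
  simp only []
  rw [fold_eq]
  set L := (PySem.Str.split? text "\n").getD [] with hLdef
  -- component 1
  have h1 : transcriptIndicators.any (fun ind => PySem.Str.isIn ind (PySem.Str.lower text))
      = (false || L.any indLine) := by
    rw [Bool.false_or, Bool.eq_iff_iff]
    simp only [List.any_eq_true, indLine]
    constructor
    · rintro ⟨i, hi, hIn⟩
      rcases (isIn_lower_lines i text (indicators_ok i hi).1 (indicators_ok i hi).2).mp hIn with ⟨l, hl, hIn'⟩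
      exact ⟨l, hl, i, hi, hIn'⟩
    · rintro ⟨l, hl, i, hi, hIn'⟩
      exact ⟨i, hi, (isIn_lower_lines i text (indicators_ok i hi).1 (indicators_ok i hi).2).mpr ⟨l, hl, hIn'⟩⟩
  -- component 2
  have hlen : (L.foldl seenLine ([] : PySem.Set String)).length
      = (conversationPatterns.filter (fun p => PySem.Str.isIn p (PySem.Str.lower text))).length := by
    have hnd1 : (L.foldl seenLine ([] : PySem.Set String)).Nodup := fold_seen_nodup L [] (List.nodup_nil)
    have hnd2 : (conversationPatterns.filter (fun p => PySem.Str.isIn p (PySem.Str.lower text))).Nodup :=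
      patterns_nodup.filter _
    refine List.Perm.length_eq ((List.perm_ext_iff_of_nodup hnd1 hnd2).mpr ?_)
    intro x
    rw [fold_seen_mem, List.mem_filter]
    constructor
    · rintro (h | ⟨hp, hex⟩)
      · simp at h
      · exact ⟨hp, (isIn_lower_lines x text (patterns_ok x hp).1 (patterns_ok x hp).2).mpr hex⟩
    · rintro ⟨hp, hIn⟩
      exact Or.inr ⟨hp, (isIn_lower_lines x text (patterns_ok x hp).1 (patterns_ok x hp).2).mp hIn⟩
  have h2 : decide (((conversationPatterns.filter
        (fun p => PySem.Str.isIn p (PySem.Str.lower text))).map (fun _ => (1 : Int))).sum ≥ 3)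
      = decide ((L.foldl seenLine ([] : PySem.Set String)).length ≥ 3) := by
    rw [PySem.List.sum_map_const_int, hlen]
    apply decide_eq_decide.mpr
    omega
  -- component 3
  have h3 : decide ((L.filter (fun line => PySem.Str.isIn ":" line && decide (PySem.Str.len line < 200))).length > 5)
      = decide ((0 : Int) + ((L.filter spkLine).length : Int) > 5) := by
    apply decide_eq_decide.mpr
    rw [show (fun line => PySem.Str.isIn ":" line && decide (PySem.Str.len line < 200)) = spkLine from rfl]
    omega
  rw [h1, h2, h3]

-- ===== VERDICT (by name: the statement is the Claim_ definition above) =====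
theorem is_likely_transcript_spec : Claim_equal_is_likely_transcript := by
  intro text _
  unfold Spec_is_likely_transcript
  exact a_eq_b text
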